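-- pv_equiv track=rewrite | github.com/pankajku/experiments | nqueens/py/helpers.py | tr2bl_diagonals_valid
-- ===== SOURCE A (Python) =====
-- def tr2bl_diagonals_valid(board, n):
--     # ensure each top-right to bottom-left diagonal has exactly one queen
--     for j in range(n):
--         count = 0
--         for i in range(j+1):
--             if board[i][j-i]: count += 1
--         if count > 1: return False
--
--     for i in range(1, n):
--         count = 0
--         for j in range(n-i):
--             if board[i+j][n-1-j]: count += 1
--         if count > 1: return False
--     return True
-- ===== SOURCE B (Python) =====
-- def tr2bl_diagonals_valid(board, n):
--     # single sweep: record each occupied cell's anti-diagonal index i+j in a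
--     # seen-set; two queens share an anti-diagonal exactly when an index repeats
--     seen = set()
--     for i in range(n):
--         for j in range(n):
--             if board[i][j]:
--                 d = i + j
--                 if d in seen:
--                     return False
--                 seen.add(d)
--     return True
-- ===== Notes on version B (the rewrite author's own statement) =====
-- stated objective: simpler
-- what changed: Replaces A's two triangular diagonal-walking loop phases (counting queens per anti-diagonal and comparing each count to 1) by one row-major sweep that inserts each occupied cell's anti-diagonal index i+j into a seen-set and fails on the first repeat.
-- outside the precondition, e.g. on tr2bl_diagonals_valid([[0, 1], [1, 0, 0], [0, 0, 0]], 3): A returns False, B raises IndexError; on tr2bl_diagonals_valid([[1, 1], [1]], 2): A returns False, B returns False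
import Mathlib
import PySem

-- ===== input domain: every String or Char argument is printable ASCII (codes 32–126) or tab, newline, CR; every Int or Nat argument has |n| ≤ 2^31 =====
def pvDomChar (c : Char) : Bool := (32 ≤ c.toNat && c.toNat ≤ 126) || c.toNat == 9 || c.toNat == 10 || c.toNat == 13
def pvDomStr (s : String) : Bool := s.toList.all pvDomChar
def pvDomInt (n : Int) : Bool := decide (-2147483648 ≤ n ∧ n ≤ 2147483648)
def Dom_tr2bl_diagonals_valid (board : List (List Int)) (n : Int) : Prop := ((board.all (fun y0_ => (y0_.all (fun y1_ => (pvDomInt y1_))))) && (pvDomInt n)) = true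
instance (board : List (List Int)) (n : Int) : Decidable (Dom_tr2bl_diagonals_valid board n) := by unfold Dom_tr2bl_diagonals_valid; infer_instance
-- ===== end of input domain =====

-- B replaces A's two triangular per-diagonal counting phases by one row-major
-- sweep with a seen-set of anti-diagonal indices i+j (objective: simpler).
-- Both ports propagate a failed board[i][j] lookup as 'none' (Python's
-- IndexError, excluded by Pre_) and the outer defs return 'false' there.

-- board[i][j]: two subscripts, each may raise (none = IndexError)
def pvCell? (board : List (List Int)) (i j : Int) : Option Int :=
  (PySem.List.pyGet? board i).bind (fun row => PySem.List.pyGet? row j)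

-- ===== PORT A =====
-- count = 0; for i in range(j+1): if board[i][j-i]: count += 1   (stops at the first failed lookup)
def pvACount1 (board : List (List Int)) (j : Int) : Option Int :=
  (PySem.List.pyRange 0 (j+1) 1).foldlM
    (fun c i => (pvCell? board i (j-i)).map (fun v => if v ≠ 0 then c + 1 else c)) 0

-- count = 0; for jj in range(n-i): if board[i+jj][n-1-jj]: count += 1
def pvACount2 (board : List (List Int)) (n i : Int) : Option Int :=
  (PySem.List.pyRange 0 (n-i) 1).foldlM
    (fun c jj => (pvCell? board (i+jj) (n-1-jj)).map (fun v => if v ≠ 0 then c + 1 else c)) 0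

-- second phase: for i in range(1, n), as recursion on the loop index
def pvALoop2 (board : List (List Int)) (n i : Int) : Option Bool :=
  if _h : i < n then
    match pvACount2 board n i with
    | none => none
    | some c => if c > 1 then some false else pvALoop2 board n (i+1)
  else some true
termination_by (n - i).toNat
decreasing_by omega

-- first phase: for j in range(n), as recursion on the loop index
def pvALoop1 (board : List (List Int)) (n j : Int) : Option Bool :=
  if _h : j < n then
    match pvACount1 board j with
    | none => none
    | some c => if c > 1 then some false else pvALoop1 board n (j+1)
  else pvALoop2 board n 1
termination_by (n - j).toNat
decreasing_by omega

def tr2bl_diagonals_valid (board : List (List Int)) (n : Int) : Bool :=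
  (pvALoop1 board n 0).getD false

-- ===== PORT B =====
-- for i in range(n): for j in range(n): …  flattened into one recursion on (i, j)
def pvBLoop (board : List (List Int)) (n i j : Int) (seen : PySem.Set Int) : Option Bool :=
  if _hi : i < n then
    if _hj : j < n then
      match pvCell? board i j with
      | none => none
      | some v =>
        if v ≠ 0 then
          if PySem.Set.contains seen (i + j) then some false
          else pvBLoop board n i (j+1) (PySem.Set.add seen (i + j))
        else pvBLoop board n i (j+1) seen
    else pvBLoop board n (i+1) 0 seen
  else some true
termination_by ((n - i).toNat, (n - j).toNat)
decreasing_by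
  · right; omega
  · right; omega
  · left; omega

def tr2bl_diagonals_valid_alt (board : List (List Int)) (n : Int) : Bool :=
  (pvBLoop board n 0 0 PySem.Set.empty).getD false

-- ===== PRECONDITION & SPEC =====
-- Pre_ excludes inputs where one of the first n rows is missing or shorter than n:
-- there board[i][j] can raise IndexError in either program (A may also return
-- False first when it finds a crowded diagonal before touching a missing cell).
def Pre_tr2bl_diagonals_valid (board : List (List Int)) (n : Int) : Prop :=
  n ≤ (board.length : Int) ∧ ∀ r ∈ board.take n.toNat, n ≤ (r.length : Int)
instance (board : List (List Int)) (n : Int) : Decidable (Pre_tr2bl_diagonals_valid board n) := by unfold Pre_tr2bl_diagonals_valid; infer_instance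

def pvWitness_tr2bl_diagonals_valid : List (List Int) × Int := ([[0, 1], [1, 0]], 2)

def Spec_tr2bl_diagonals_valid (board : List (List Int)) (n : Int) (out : Bool) : Prop := out = tr2bl_diagonals_valid_alt board n
instance (board : List (List Int)) (n : Int) (out : Bool) : Decidable (Spec_tr2bl_diagonals_valid board n out) := by unfold Spec_tr2bl_diagonals_valid; infer_instance

-- ===== CLAIM (what is proved, stated in full; the proofs are below) =====
def Claim_equal_tr2bl_diagonals_valid : Prop := ∀ (board : List (List Int)) (n : Int), Dom_tr2bl_diagonals_valid board n → Pre_tr2bl_diagonals_valid board n → Spec_tr2bl_diagonals_valid board n (tr2bl_diagonals_valid board n)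

-- ===== LEMMAS AND PROOFS =====

-- total value of board[i][j] (proof-side; under Pre_ it is what pvCell? returns)
def pvCell (board : List (List Int)) (i j : Int) : Int :=
  (pvCell? board i j).getD 0

theorem pvCell?_some (board : List (List Int)) (n i j : Int)
    (hP : Pre_tr2bl_diagonals_valid board n) (hi0 : 0 ≤ i) (hin : i < n)
    (hj0 : 0 ≤ j) (hjn : j < n) :
    pvCell? board i j = some (pvCell board i j) := by
  obtain ⟨hlen, hrows⟩ := hP
  have hidx : i.toNat < board.length := by omega
  have hrow : PySem.List.pyGet? board i = some (board[i.toNat]'hidx) :=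
    PySem.List.pyGet?_eq_some_getElem board hi0 (by omega)
  have htk : i.toNat < (board.take n.toNat).length := by
    simp only [List.length_take]
    omega
  have hmem : board[i.toNat]'hidx ∈ board.take n.toNat := by
    have h9 := List.getElem_mem htk
    rwa [List.getElem_take] at h9
  have hrl := hrows _ hmem
  have hcol : PySem.List.pyGet? (board[i.toNat]'hidx) j =
      some ((board[i.toNat]'hidx)[j.toNat]'(by omega)) :=
    PySem.List.pyGet?_eq_some_getElem _ hj0 (by omega)
  simp [pvCell?, pvCell, hrow, hcol]

-- anti-diagonal indices of the occupied cells of row i (grid restricted to n columns)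
def pvRowOcc (board : List (List Int)) (n i : Int) : List Int :=
  ((PySem.List.pyRange 0 n 1).filter (fun j => pvCell board i j ≠ 0)).map (fun j => i + j)

-- all anti-diagonal indices of occupied cells, row-major
def pvOcc (board : List (List Int)) (n : Int) : List Int :=
  (PySem.List.pyRange 0 n 1).flatMap (pvRowOcc board n)

-- number of occupied cells on anti-diagonal d
def pvDcnt (board : List (List Int)) (n d : Int) : Nat :=
  (PySem.List.pyRange 0 n 1).countP (fun i => decide (pvCell board i (d-i) ≠ 0 ∧ 0 ≤ d - i ∧ d - i < n))

-- total values of A's two inner counting loops (proof-side)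
def pvC1 (board : List (List Int)) (j : Int) : Int :=
  (PySem.List.pyRange 0 (j+1) 1).foldl (fun c i => if pvCell board i (j-i) ≠ 0 then c + 1 else c) 0

def pvC2 (board : List (List Int)) (n i : Int) : Int :=
  (PySem.List.pyRange 0 (n-i) 1).foldl (fun c jj => if pvCell board (i+jj) (n-1-jj) ≠ 0 then c + 1 else c) 0

theorem pvFoldlM_total (f : Int → Int → Option Int) (g : Int → Int → Int) (l : List Int) (c : Int)
    (h : ∀ x ∈ l, ∀ acc, f acc x = some (g acc x)) :
    l.foldlM f c = some (l.foldl g c) := by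
  induction l generalizing c with
  | nil => simp
  | cons x xs ih =>
    rw [List.foldlM_cons, h x (List.mem_cons_self ..) c]
    exact ih (g c x) (fun y hy acc => h y (List.mem_cons_of_mem _ hy) acc)

theorem pvACount1_some (board : List (List Int)) (n j : Int)
    (hP : Pre_tr2bl_diagonals_valid board n) (_h0 : 0 ≤ j) (h1 : j < n) :
    pvACount1 board j = some (pvC1 board j) := by
  unfold pvACount1 pvC1
  refine pvFoldlM_total _ _ _ _ (fun x hx acc => ?_)
  have hb := PySem.List.mem_pyRange_one.1 hx
  rw [pvCell?_some board n x (j-x) hP (by omega) (by omega) (by omega) (by omega)]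
  rfl

theorem pvACount2_some (board : List (List Int)) (n i : Int)
    (hP : Pre_tr2bl_diagonals_valid board n) (h0 : 1 ≤ i) (_h1 : i < n) :
    pvACount2 board n i = some (pvC2 board n i) := by
  unfold pvACount2 pvC2
  refine pvFoldlM_total _ _ _ _ (fun x hx acc => ?_)
  have hb := PySem.List.mem_pyRange_one.1 hx
  rw [pvCell?_some board n (i+x) (n-1-x) hP (by omega) (by omega) (by omega) (by omega)]
  rfl

theorem pvALoop2_eq (board : List (List Int)) (n : Int)
    (hP : Pre_tr2bl_diagonals_valid board n) :
    ∀ (m : Nat) (i : Int), 1 ≤ i → (n - i).toNat ≤ m →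
      pvALoop2 board n i =
        some ((PySem.List.pyRange i n 1).all (fun k => decide (pvC2 board n k ≤ 1))) := by
  intro m
  induction m with
  | zero =>
    intro i h1 hm
    have hin : ¬ i < n := by omega
    rw [pvALoop2, dif_neg hin, PySem.List.pyRange_one_eq_nil (by omega)]
    simp
  | succ m ih =>
    intro i h1 hm
    by_cases hin : i < n
    · rw [pvALoop2, dif_pos hin, pvACount2_some board n i hP h1 hin,
          PySem.List.pyRange_one_cons hin]
      by_cases hc : pvC2 board n i > 1
      · have hd : ¬ (pvC2 board n i ≤ 1) := by omega
        simp [hc, hd]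
      · have hd : pvC2 board n i ≤ 1 := by omega
        simp only [if_neg hc, ih (i+1) (by omega) (by omega), List.all_cons,
          hd, decide_true, Bool.true_and]
    · rw [pvALoop2, dif_neg hin, PySem.List.pyRange_one_eq_nil (by omega)]
      simp

theorem pvALoop1_eq (board : List (List Int)) (n : Int)
    (hP : Pre_tr2bl_diagonals_valid board n) :
    ∀ (m : Nat) (j : Int), 0 ≤ j → (n - j).toNat ≤ m →
      pvALoop1 board n j =
        some (((PySem.List.pyRange j n 1).all (fun k => decide (pvC1 board k ≤ 1))) &&
              ((PySem.List.pyRange 1 n 1).all (fun k => decide (pvC2 board n k ≤ 1)))) := by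
  intro m
  induction m with
  | zero =>
    intro j h0 hm
    have hjn : ¬ j < n := by omega
    rw [pvALoop1, dif_neg hjn, pvALoop2_eq board n hP (n-1).toNat 1 (by omega) (by omega),
        PySem.List.pyRange_one_eq_nil (show n ≤ j by omega)]
    simp
  | succ m ih =>
    intro j h0 hm
    by_cases hjn : j < n
    · rw [pvALoop1, dif_pos hjn, pvACount1_some board n j hP h0 hjn,
          PySem.List.pyRange_one_cons hjn]
      by_cases hc : pvC1 board j > 1
      · have hd : ¬ (pvC1 board j ≤ 1) := by omega
        simp [hc, hd]
      · have hd : pvC1 board j ≤ 1 := by omega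
        simp only [if_neg hc, ih (j+1) (by omega) (by omega), List.all_cons,
          hd, decide_true, Bool.true_and]
    · rw [pvALoop1, dif_neg hjn, pvALoop2_eq board n hP (n-1).toNat 1 (by omega) (by omega),
          PySem.List.pyRange_one_eq_nil (show n ≤ j by omega)]
      simp

-- the anti-diagonal indices of the occupied cells B has not visited yet, from (i, j) on
def pvRest (board : List (List Int)) (n i j : Int) : List Int :=
  if i < n then
    ((PySem.List.pyRange j n 1).filter (fun c => pvCell board i c ≠ 0)).map (fun c => i + c)
      ++ (PySem.List.pyRange (i+1) n 1).flatMap (pvRowOcc board n)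
  else []

theorem pvRest_row (board : List (List Int)) (n i j : Int) (hin : i < n) (hjn : n ≤ j) :
    pvRest board n i j = pvRest board n (i+1) 0 := by
  unfold pvRest
  rw [if_pos hin, PySem.List.pyRange_one_eq_nil hjn]
  simp only [List.filter_nil, List.map_nil, List.nil_append]
  by_cases h2 : i + 1 < n
  · rw [if_pos h2, PySem.List.pyRange_one_cons h2, List.flatMap_cons]
    rfl
  · rw [if_neg h2, PySem.List.pyRange_one_eq_nil (by omega), List.flatMap_nil]

theorem pvRest_cons (board : List (List Int)) (n i j : Int) (hin : i < n) (hjn : j < n) :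
    pvRest board n i j =
      (if pvCell board i j ≠ 0 then [i + j] else []) ++ pvRest board n i (j+1) := by
  unfold pvRest
  rw [if_pos hin, if_pos hin, PySem.List.pyRange_one_cons hjn]
  by_cases hc : pvCell board i j ≠ 0
  · rw [List.filter_cons_of_pos (by simpa using hc), if_pos hc]
    simp
  · rw [List.filter_cons_of_neg (by simpa using hc), if_neg hc]
    simp

theorem pvBLoop_eq (board : List (List Int)) (n : Int)
    (hP : Pre_tr2bl_diagonals_valid board n) :
    ∀ (mi mj : Nat) (i j : Int) (seen : PySem.Set Int), 0 ≤ i → 0 ≤ j →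
      (n - i).toNat ≤ mi → (n - j).toNat ≤ mj →
      pvBLoop board n i j seen =
        some (decide ((pvRest board n i j).Nodup ∧ ∀ x ∈ pvRest board n i j, x ∉ seen)) := by
  intro mi
  induction mi with
  | zero =>
    intro mj i j seen h0i h0j hmi hmj
    have hin : ¬ i < n := by omega
    rw [pvBLoop, dif_neg hin]
    unfold pvRest
    rw [if_neg hin]
    simp
  | succ mi ihmi =>
    intro mj
    induction mj with
    | zero =>
      intro i j seen h0i h0j hmi hmj
      by_cases hin : i < n
      · have hjn : ¬ j < n := by omega
        rw [pvBLoop, dif_pos hin, dif_neg hjn,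
            ihmi n.toNat (i+1) 0 seen (by omega) (by omega) (by omega) (by omega),
            pvRest_row board n i j hin (by omega)]
      · rw [pvBLoop, dif_neg hin]
        unfold pvRest
        rw [if_neg hin]
        simp
    | succ mj ihmj =>
      intro i j seen h0i h0j hmi hmj
      by_cases hin : i < n
      · by_cases hjn : j < n
        · have hv := pvCell?_some board n i j hP h0i hin h0j hjn
          rw [pvBLoop, dif_pos hin, dif_pos hjn, hv, pvRest_cons board n i j hin hjn]
          show (if pvCell board i j ≠ 0 then
                  (if PySem.Set.contains seen (i + j) then some false
                   else pvBLoop board n i (j+1) (PySem.Set.add seen (i + j)))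
                else pvBLoop board n i (j+1) seen) = _
          by_cases hc : pvCell board i j ≠ 0
          · rw [if_pos hc, if_pos hc, List.singleton_append]
            by_cases hm : (i + j) ∈ seen
            · rw [if_pos ((PySem.Set.contains_iff seen (i+j)).2 hm)]
              congr 1
              symm
              apply decide_eq_false
              rintro ⟨-, hdis⟩
              exact hdis (i+j) (List.mem_cons_self ..) hm
            · rw [if_neg (fun hcont => hm ((PySem.Set.contains_iff seen (i+j)).1 hcont)),
                  ihmj i (j+1) (PySem.Set.add seen (i+j)) h0i (by omega) (by omega) (by omega)]
              congr 1
              rw [decide_eq_decide]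
              constructor
              · rintro ⟨hnd, hdis⟩
                refine ⟨List.nodup_cons.2 ⟨fun hmem => ?_, hnd⟩, ?_⟩
                · exact (hdis _ hmem) (by rw [PySem.Set.mem_add]; right; rfl)
                · intro x hx
                  rcases List.mem_cons.1 hx with rfl | hx'
                  · exact hm
                  · exact fun hxs => (hdis x hx') (by rw [PySem.Set.mem_add]; left; exact hxs)
              · rintro ⟨hnd, hdis⟩
                refine ⟨(List.nodup_cons.1 hnd).2, fun x hx hxadd => ?_⟩
                rcases (PySem.Set.mem_add seen (i+j) x).1 hxadd with hxs | rfl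
                · exact hdis x (List.mem_cons_of_mem _ hx) hxs
                · exact (List.nodup_cons.1 hnd).1 hx
          · rw [if_neg hc, if_neg hc, List.nil_append,
                ihmj i (j+1) seen h0i (by omega) (by omega) (by omega)]
        · rw [pvBLoop, dif_pos hin, dif_neg hjn,
              ihmi n.toNat (i+1) 0 seen (by omega) (by omega) (by omega) (by omega),
              pvRest_row board n i j hin (by omega)]
      · rw [pvBLoop, dif_neg hin]
        unfold pvRest
        rw [if_neg hin]
        simp

theorem pvAlt_iff (board : List (List Int)) (n : Int)
    (hP : Pre_tr2bl_diagonals_valid board n) :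
    tr2bl_diagonals_valid_alt board n = true ↔ (pvOcc board n).Nodup := by
  unfold tr2bl_diagonals_valid_alt
  rw [pvBLoop_eq board n hP n.toNat n.toNat 0 0 PySem.Set.empty (le_refl 0) (le_refl 0) (by omega) (by omega)]
  simp only [Option.getD_some, decide_eq_true_eq]
  have hro : pvRest board n 0 0 = pvOcc board n := by
    unfold pvRest pvOcc
    by_cases hn : 0 < n
    · rw [if_pos hn]
      conv_rhs => rw [PySem.List.pyRange_one_cons hn, List.flatMap_cons]
      rfl
    · rw [if_neg hn, PySem.List.pyRange_one_eq_nil (by omega), List.flatMap_nil]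
  rw [hro]
  constructor
  · rintro ⟨h1, -⟩
    exact h1
  · intro h1
    refine ⟨h1, fun x _ hxe => ?_⟩
    simp [PySem.Set.empty] at hxe

theorem pvRowOcc_count (board : List (List Int)) (n i d : Int) :
    (pvRowOcc board n i).count d = if pvCell board i (d-i) ≠ 0 ∧ 0 ≤ d - i ∧ d - i < n then 1 else 0 := by
  unfold pvRowOcc
  by_cases hP : pvCell board i (d-i) ≠ 0 ∧ 0 ≤ d - i ∧ d - i < n
  · rw [if_pos hP]
    have hinj : Function.Injective (fun j : Int => i + j) := fun a b h => by simpa using h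
    rw [show d = i + (d - i) from by omega,
        List.count_map_of_injective _ _ hinj (d - i),
        List.count_filter (by simpa using hP.1)]
    exact List.count_eq_one_of_mem (PySem.List.nodup_pyRange_one 0 n)
      (PySem.List.mem_pyRange_one.2 ⟨hP.2.1, hP.2.2⟩)
  · rw [if_neg hP]
    apply List.count_eq_zero.2
    intro hd
    rcases List.mem_map.1 hd with ⟨j, hjf, hij⟩
    rcases List.mem_filter.1 hjf with ⟨hjr, hcell⟩
    have hj := PySem.List.mem_pyRange_one.1 hjr
    have hje : j = d - i := by omega
    exact hP ⟨by simpa [hje] using of_decide_eq_true hcell, by omega, by omega⟩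

theorem pvOcc_count (board : List (List Int)) (n d : Int) :
    (pvOcc board n).count d = pvDcnt board n d := by
  unfold pvOcc pvDcnt
  generalize PySem.List.pyRange 0 n 1 = rows
  induction rows with
  | nil => simp
  | cons r rs ih =>
    rw [List.flatMap_cons, List.count_append, ih, List.countP_cons, pvRowOcc_count]
    by_cases h : pvCell board r (d-r) ≠ 0 ∧ 0 ≤ d - r ∧ d - r < n
    · rw [if_pos h, if_pos (by simpa using h)]
      omega
    · rw [if_neg h, if_neg (by simpa using h)]
      omega

theorem pvCountP_shift (q : Int → Bool) (a b c : Int) :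
    (PySem.List.pyRange (c+a) (c+b) 1).countP q = (PySem.List.pyRange a b 1).countP (fun x => q (c+x)) := by
  rw [PySem.List.pyRange_one (c+a) (c+b), PySem.List.pyRange_one a b,
      List.countP_map, List.countP_map, show c + b - (c + a) = b - a from by ring]
  refine List.countP_congr (fun k _ => ?_)
  have e : c + a + (k : Int) = c + (a + (k : Int)) := by ring
  simp [e]

theorem pvCount1_eq (board : List (List Int)) (n j : Int) (h0 : 0 ≤ j) (h1 : j < n) :
    pvC1 board j = (pvDcnt board n j : Int) := by
  unfold pvC1 pvDcnt
  rw [PySem.List.foldl_ite_add_one (fun i => pvCell board i (j-i) ≠ 0),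
      PySem.List.pyRange_one_append 0 (j+1) n (by omega) (by omega), List.countP_append]
  have h2 : (PySem.List.pyRange (j+1) n 1).countP
      (fun i => decide (pvCell board i (j-i) ≠ 0 ∧ 0 ≤ j - i ∧ j - i < n)) = 0 := by
    refine List.countP_eq_zero.2 (fun a ha => ?_)
    have := PySem.List.mem_pyRange_one.1 ha
    simp only [decide_eq_true_eq]
    rintro ⟨-, hge, -⟩
    omega
  have h3 : (PySem.List.pyRange 0 (j+1) 1).countP
      (fun i => decide (pvCell board i (j-i) ≠ 0)) =
      (PySem.List.pyRange 0 (j+1) 1).countP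
      (fun i => decide (pvCell board i (j-i) ≠ 0 ∧ 0 ≤ j - i ∧ j - i < n)) := by
    refine List.countP_congr (fun a ha => ?_)
    have := PySem.List.mem_pyRange_one.1 ha
    simp only [decide_eq_true_eq]
    constructor
    · intro hc; exact ⟨hc, by omega, by omega⟩
    · tauto
  rw [h2, h3]
  omega

theorem pvCount2_eq (board : List (List Int)) (n i : Int) (h0 : 1 ≤ i) (h1 : i < n) :
    pvC2 board n i = (pvDcnt board n (n-1+i) : Int) := by
  unfold pvC2 pvDcnt
  rw [PySem.List.foldl_ite_add_one (fun jj => pvCell board (i+jj) (n-1-jj) ≠ 0),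
      PySem.List.pyRange_one_append 0 i n (by omega) (by omega), List.countP_append]
  have hL : (PySem.List.pyRange 0 i 1).countP
      (fun r => decide (pvCell board r (n-1+i-r) ≠ 0 ∧ 0 ≤ n-1+i-r ∧ n-1+i-r < n)) = 0 := by
    refine List.countP_eq_zero.2 (fun a ha => ?_)
    have := PySem.List.mem_pyRange_one.1 ha
    simp only [decide_eq_true_eq]
    rintro ⟨-, -, hlt⟩
    omega
  have hsh := pvCountP_shift
    (fun r => decide (pvCell board r (n-1+i-r) ≠ 0 ∧ 0 ≤ n-1+i-r ∧ n-1+i-r < n)) 0 (n-i) i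
  rw [show i + 0 = i from by ring, show i + (n-i) = n from by ring] at hsh
  have hco : (PySem.List.pyRange 0 (n-i) 1).countP
      (fun x => decide (pvCell board (i+x) (n-1+i-(i+x)) ≠ 0 ∧ 0 ≤ n-1+i-(i+x) ∧ n-1+i-(i+x) < n)) =
      (PySem.List.pyRange 0 (n-i) 1).countP
      (fun x => decide (pvCell board (i+x) (n-1-x) ≠ 0)) := by
    refine List.countP_congr (fun a ha => ?_)
    have := PySem.List.mem_pyRange_one.1 ha
    have e : n - 1 + i - (i + a) = n - 1 - a := by ring
    simp only [e, decide_eq_true_eq]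
    constructor
    · tauto
    · intro hc; exact ⟨hc, by omega, by omega⟩
  rw [hL, hsh, hco]
  omega

theorem pvDcnt_outside (board : List (List Int)) (n d : Int) (h : ¬(0 ≤ d ∧ d < 2*n-1)) :
    pvDcnt board n d = 0 := by
  unfold pvDcnt
  refine List.countP_eq_zero.2 (fun a ha => ?_)
  have := PySem.List.mem_pyRange_one.1 ha
  simp only [decide_eq_true_eq]
  rintro ⟨-, hge, hlt⟩
  omega

theorem pvA_iff (board : List (List Int)) (n : Int)
    (hP : Pre_tr2bl_diagonals_valid board n) :
    tr2bl_diagonals_valid board n = true ↔ ∀ d : Int, pvDcnt board n d ≤ 1 := by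
  unfold tr2bl_diagonals_valid
  rw [pvALoop1_eq board n hP n.toNat 0 (by omega) (by omega)]
  simp only [Option.getD_some, Bool.and_eq_true, List.all_eq_true, decide_eq_true_eq]
  constructor
  · rintro ⟨h1, h2⟩ d
    by_cases hd1 : 0 ≤ d ∧ d < n
    · have := h1 d (PySem.List.mem_pyRange_one.2 ⟨hd1.1, hd1.2⟩)
      rw [pvCount1_eq board n d hd1.1 hd1.2] at this
      omega
    · by_cases hd2 : n ≤ d ∧ d < 2*n-1
      · have hi : d - (n-1) ∈ PySem.List.pyRange 1 n 1 :=
          PySem.List.mem_pyRange_one.2 ⟨by omega, by omega⟩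
        have := h2 _ hi
        rw [pvCount2_eq board n _ (by omega) (by omega),
            show n - 1 + (d - (n-1)) = d from by ring] at this
        omega
      · rw [pvDcnt_outside board n d (by omega)]
        omega
  · intro h
    refine ⟨fun j hj => ?_, fun i hi => ?_⟩
    · have hj' := PySem.List.mem_pyRange_one.1 hj
      rw [pvCount1_eq board n j hj'.1 hj'.2]
      have := h j
      omega
    · have hi' := PySem.List.mem_pyRange_one.1 hi
      rw [pvCount2_eq board n i hi'.1 hi'.2]
      have := h (n-1+i)
      omega

-- ===== VERDICT (by name: the statement is the Claim_ definition above) =====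
theorem tr2bl_diagonals_valid_spec : Claim_equal_tr2bl_diagonals_valid := by
  intro board n _ hP
  unfold Spec_tr2bl_diagonals_valid
  rw [Bool.eq_iff_iff, pvA_iff board n hP, pvAlt_iff board n hP, List.nodup_iff_count_le_one]
  constructor
  · intro h a
    rw [pvOcc_count]
    exact h a
  · intro h d
    rw [← pvOcc_count]
    exact h d
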